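-- pv_equiv track=rewrite | github.com/descipar/marktcrawler | scripts/bake_version.py | _last_commit_from_log
-- ===== SOURCE A (Python) =====
-- def _last_commit_from_log(log_lines: list) -> tuple:
--     """Gibt (meta, message, timestamp) des letzten echten Commits zurück."""
--     for line in reversed(log_lines):
--         m, _, msg = line.partition("\t")
--         if msg.startswith("commit"):
--             parts = m.split()
--             ts = int(parts[-2]) if len(parts) >= 2 else 0
--             return m, msg.split(": ", 1)[-1].strip(), ts
--     return "", "", 0
-- ===== SOURCE B (Python) =====
-- def _last_commit_from_log(log_lines: list) -> tuple:
--     """Gibt (meta, message, timestamp) des letzten echten Commits zurück."""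
--     best = None
--     for line in log_lines:
--         i = line.find("\t")
--         if i < 0:
--             continue
--         msg = line[i + 1:]
--         if msg.startswith("commit"):
--             best = (line[:i], msg)
--     if best is None:
--         return "", "", 0
--     m, msg = best
--     words = m.split()
--     ts = int(words[-2]) if len(words) >= 2 else 0
--     j = msg.find(": ")
--     body = msg if j < 0 else msg[j + 2:]
--     return m, body.strip(), ts
-- ===== Notes on version B (the rewrite author's own statement) =====
-- stated objective: alternative
-- what changed: Replaces the reverse scan with early exit and partition/split parsing by a single forward fold that keeps the last matching (meta, msg) pair, locating the tab and the ': ' separator with find and slicing instead of partition and split(': ', 1).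
import Mathlib
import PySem

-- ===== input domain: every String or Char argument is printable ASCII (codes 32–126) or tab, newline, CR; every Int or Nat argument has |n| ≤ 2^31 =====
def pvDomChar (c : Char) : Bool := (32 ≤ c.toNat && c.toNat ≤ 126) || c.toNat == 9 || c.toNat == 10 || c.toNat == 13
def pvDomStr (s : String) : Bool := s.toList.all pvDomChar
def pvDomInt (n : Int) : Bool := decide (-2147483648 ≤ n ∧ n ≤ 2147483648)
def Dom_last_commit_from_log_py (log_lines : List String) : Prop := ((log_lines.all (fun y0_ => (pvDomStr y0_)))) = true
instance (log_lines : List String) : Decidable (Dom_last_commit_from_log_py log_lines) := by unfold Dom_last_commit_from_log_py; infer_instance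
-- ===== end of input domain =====

-- B replaces A's reverse scan + partition/split parsing by a forward fold that keeps the last
-- matching (meta, msg) pair, locating the separators with find and slicing; equal on Pre_.

-- ===== PORT A =====
-- 'for line in reversed(log_lines)' with early return, as structural recursion on the reversed
-- list; line.partition("\t") for the single-char separator is exactly takeWhile/dropWhile.
def lastCommitRevScan : List String → String × String × Int
  | [] => ("", "", 0)
  | line :: rest =>
    let m : String := String.ofList (line.toList.takeWhile (fun c => c != '\t'))
    let msg : String := String.ofList ((line.toList.dropWhile (fun c => c != '\t')).drop 1)
    if PySem.Str.startswith msg "commit" then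
      let parts := PySem.Str.split₀ m
      -- int(parts[-2]): where Python's int() raises (ofStr? = none) the input is outside Pre_
      let ts : Int := if 2 ≤ parts.length then
          (PySem.Int.ofStr? ((PySem.List.pyGet? parts (-2)).getD "")).getD 0 else 0
      (m, PySem.Str.strip (((PySem.Str.splitMax? msg ": " 1).getD []).getLastD ""), ts)
    else lastCommitRevScan rest

def last_commit_from_log_py (log_lines : List String) : String × String × Int :=
  lastCommitRevScan log_lines.reverse

-- ===== PORT B =====
-- forward pass: best is overwritten with the (line[:i], line[i+1:]) of each matching line
def pvStepB (best : Option (String × String)) (line : String) : Option (String × String) :=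
  let i := PySem.Str.find line "\t"
  if i < 0 then best
  else
    let msg := PySem.Str.slice line (some (i + 1)) none
    if PySem.Str.startswith msg "commit" then
      some (PySem.Str.slice line none (some i), msg)
    else best

def last_commit_from_log_py_alt (log_lines : List String) : String × String × Int :=
  match log_lines.foldl pvStepB none with
  | none => ("", "", 0)
  | some (m, msg) =>
    let words := PySem.Str.split₀ m
    -- int(words[-2]): where Python's int() raises (ofStr? = none) the input is outside Pre_
    let ts : Int := if 2 ≤ words.length then
        (PySem.Int.ofStr? ((PySem.List.pyGet? words (-2)).getD "")).getD 0 else 0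
    let j := PySem.Str.find msg ": "
    let body := if j < 0 then msg else PySem.Str.slice msg (some (j + 2)) none
    (m, PySem.Str.strip body, ts)

-- ===== PRECONDITION & SPEC =====
-- Pre_ excludes exactly the inputs on which Python A (and B alike) raises ValueError: the last
-- line whose post-tab message starts with "commit" has a meta of ≥ 2 whitespace-separated words
-- whose second-to-last word is not parseable by int().
def pvPreCommitLine (line : String) : Bool :=
  PySem.Chars.startswith ((line.toList.dropWhile (fun c => c != '\t')).drop 1) "commit".toList
def pvPreTsOk (line : String) : Bool :=
  let parts := PySem.Str.split₀ (String.ofList (line.toList.takeWhile (fun c => c != '\t')))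
  decide (parts.length < 2) || (PySem.Int.ofStr? ((PySem.List.pyGet? parts (-2)).getD "")).isSome
def Pre_last_commit_from_log_py (log_lines : List String) : Prop :=
  ((log_lines.filter pvPreCommitLine).getLast?.all pvPreTsOk) = true
instance (log_lines : List String) : Decidable (Pre_last_commit_from_log_py log_lines) := by
  unfold Pre_last_commit_from_log_py; infer_instance
def pvWitness_last_commit_from_log_py : List String := ["a 5 x\tcommit: hi", "meta\tnope"]

def Spec_last_commit_from_log_py (log_lines : List String) (out : String × String × Int) : Prop := out = last_commit_from_log_py_alt log_lines
instance (log_lines : List String) (out : String × String × Int) : Decidable (Spec_last_commit_from_log_py log_lines out) := by unfold Spec_last_commit_from_log_py; infer_instance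

-- ===== CLAIM (what is proved, stated in full; the proofs are below) =====
def Claim_equal_last_commit_from_log_py : Prop := ∀ (log_lines : List String), Dom_last_commit_from_log_py log_lines → Pre_last_commit_from_log_py log_lines → Spec_last_commit_from_log_py log_lines (last_commit_from_log_py log_lines)

-- ===== LEMMAS AND PROOFS =====

-- A's guard on a line, and B's two slices of a matching line
def pvGuardA (line : String) : Bool :=
  PySem.Str.startswith (String.ofList ((line.toList.dropWhile (fun c => c != '\t')).drop 1)) "commit"
def pvMB (line : String) : String := PySem.Str.slice line none (some (PySem.Str.find line "\t"))
def pvMsgB (line : String) : String :=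
  PySem.Str.slice line (some (PySem.Str.find line "\t" + 1)) none

-- takeWhile/dropWhile at the first occurrence of a character
theorem takeDrop_at_first (l : List Char) (k : Nat)
    (hmin : ∀ i < k, ¬ ['\t'] <+: l.drop i) (hk : ['\t'] <+: l.drop k) :
    l.takeWhile (fun c => c != '\t') = l.take k ∧
      l.dropWhile (fun c => c != '\t') = l.drop k := by
  induction l generalizing k with
  | nil => simp at hk
  | cons c rest ih =>
    cases k with
    | zero =>
      have hc : '\t' = c := by simpa using hk
      subst hc
      simp
    | succ k' =>
      have hc : c ≠ '\t' := by
        intro h; subst h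
        exact hmin 0 (Nat.succ_pos _) (by simp)
      have hcb : (c != '\t') = true := by simpa using hc
      have ih' := ih k' (fun i hi => by simpa using hmin (i + 1) (by omega)) (by simpa using hk)
      simp [hcb, ih'.1, ih'.2]

-- no occurrence of '\t'
theorem takeDrop_no_tab (l : List Char) (h : ¬ ['\t'] <:+: l) :
    l.takeWhile (fun c => c != '\t') = l ∧ l.dropWhile (fun c => c != '\t') = [] := by
  have hall : ∀ x ∈ l, (fun c => c != '\t') x = true := by
    intro x hx
    simp only [bne_iff_ne, ne_eq]
    rintro rfl
    obtain ⟨s, t, rfl⟩ := List.mem_iff_append.mp hx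
    exact h ⟨s, t, by simp⟩
  exact ⟨List.takeWhile_eq_self_iff.mpr hall, List.dropWhile_eq_nil_iff.mpr hall⟩

-- if the tab is absent, A's guard is false (msg = "")
theorem guard_false_of_find_neg (line : String)
    (h : PySem.Str.find line "\t" < 0) : pvGuardA line = false := by
  have h1 : PySem.Chars.find line.toList ['\t'] = -1 := by
    have h2 : PySem.Str.find line "\t" = PySem.Chars.find line.toList ['\t'] :=
      PySem.Str.find_eq line "\t"
    have := PySem.Chars.neg_one_le_find line.toList ['\t']
    omega
  have hd := (takeDrop_no_tab line.toList
    ((PySem.Chars.find_eq_neg_one_iff _ _).mp h1)).2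
  unfold pvGuardA
  rw [hd]
  decide

-- if the tab is present, B's two slices are exactly A's partition pieces
theorem parse_eq (line : String) (h : 0 ≤ PySem.Str.find line "\t") :
    String.ofList (line.toList.takeWhile (fun c => c != '\t')) = pvMB line ∧
      String.ofList ((line.toList.dropWhile (fun c => c != '\t')).drop 1) = pvMsgB line := by
  have heq : PySem.Str.find line "\t" = PySem.Chars.find line.toList ['\t'] :=
    PySem.Str.find_eq line "\t"
  have h0 : 0 ≤ PySem.Chars.find line.toList ['\t'] := heq ▸ h
  obtain ⟨hpre, hmin⟩ := PySem.Chars.find_spec h0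
  obtain ⟨ht, hdrop⟩ := takeDrop_at_first line.toList
    (PySem.Chars.find line.toList ['\t']).toNat hmin hpre
  constructor
  · apply String.toList_injective
    rw [ht]
    unfold pvMB
    rw [PySem.Str.toList_slice, PySem.Chars.slice_eq_listSlice, String.toList_ofList,
      PySem.List.slice_to _ h, heq]
  · apply String.toList_injective
    rw [hdrop]
    unfold pvMsgB
    rw [PySem.Str.toList_slice, PySem.Chars.slice_eq_listSlice, String.toList_ofList,
      PySem.List.slice_from _ (by omega), heq, List.drop_drop]
    congr 1
    omega

-- pvStepB acts as: replace best by the parsed pair whenever A's guard holds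
theorem stepB_eq (best : Option (String × String)) (line : String) :
    pvStepB best line =
      if pvGuardA line then some (pvMB line, pvMsgB line) else best := by
  by_cases h : PySem.Str.find line "\t" < 0
  · rw [guard_false_of_find_neg line h]
    simp only [pvStepB]
    rw [if_pos h, if_neg (Bool.false_ne_true)]
  · rw [not_lt] at h
    obtain ⟨hm, hmsg⟩ := parse_eq line h
    simp only [pvStepB]
    rw [if_neg (not_lt.mpr h)]
    have hg : pvGuardA line =
        PySem.Str.startswith (PySem.Str.slice line (some (PySem.Str.find line "\t" + 1)) none)
          "commit" := by
      unfold pvGuardA; rw [hmsg]; rfl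
    rw [hg]
    unfold pvMB pvMsgB
    rfl

-- B's forward fold keeps the last guard-satisfying line (first of the reversed list)
theorem foldl_stepB (xs : List String) (acc : Option (String × String)) :
    xs.foldl pvStepB acc =
      match xs.reverse.find? pvGuardA with
      | none => acc
      | some l => some (pvMB l, pvMsgB l) := by
  induction xs generalizing acc with
  | nil => rfl
  | cons x xs ih =>
    simp only [List.foldl_cons, List.reverse_cons, List.find?_append, ih, stepB_eq]
    cases hf : xs.reverse.find? pvGuardA with
    | some l => simp
    | none =>
      by_cases h : pvGuardA x = true
      · simp [List.find?, h]
      · simp only [Bool.not_eq_true] at h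
        simp [List.find?, h]

-- A's reverse scan returns the parse of the first guard-satisfying line of the reversed list
theorem revScan_eq_find (ys : List String) :
    lastCommitRevScan ys =
      match ys.find? pvGuardA with
      | none => ("", "", 0)
      | some l =>
        let m : String := String.ofList (l.toList.takeWhile (fun c => c != '\t'))
        let msg : String := String.ofList ((l.toList.dropWhile (fun c => c != '\t')).drop 1)
        let parts := PySem.Str.split₀ m
        let ts : Int := if 2 ≤ parts.length then
            (PySem.Int.ofStr? ((PySem.List.pyGet? parts (-2)).getD "")).getD 0 else 0
        (m, PySem.Str.strip (((PySem.Str.splitMax? msg ": " 1).getD []).getLastD ""), ts) := by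
  induction ys with
  | nil => rfl
  | cons y ys ih =>
    by_cases h : pvGuardA y = true
    · have h' := h; unfold pvGuardA at h'; simp at h'
      simp [lastCommitRevScan, List.find?, h, h']
    · have h' := h
      unfold pvGuardA at h'
      simp only [Bool.not_eq_true] at h
      simp at h'
      simp [lastCommitRevScan, List.find?, h, h', ih]

-- characterizations of splitOnMax.go for maxsplit 1 --------------------------------------------

theorem go_msplit_zero (sep : List Char) (fuel : Nat) (l cur : List Char)
    (acc : List (List Char)) :
    PySem.Chars.splitOnMax.go sep fuel 0 l cur acc = ((cur.reverse ++ l) :: acc).reverse := by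
  cases fuel <;> cases l <;> simp [PySem.Chars.splitOnMax.go]

theorem go_one_notfound (sep : List Char) (l : List Char) (h : ¬ sep <:+: l) :
    ∀ (fuel : Nat) (cur : List Char) (acc : List (List Char)), l.length ≤ fuel →
      PySem.Chars.splitOnMax.go sep fuel 1 l cur acc = ((cur.reverse ++ l) :: acc).reverse := by
  induction l with
  | nil => intro fuel cur acc _; cases fuel <;> simp [PySem.Chars.splitOnMax.go]
  | cons c rest ih =>
    intro fuel cur acc hf
    cases fuel with
    | zero => simp at hf
    | succ f =>
      have hp : sep.isPrefixOf (c :: rest) = false := by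
        rw [Bool.eq_false_iff]
        intro hpre
        exact h ((List.isPrefixOf_iff_prefix.mp hpre).isInfix)
      have hrest : ¬ sep <:+: rest := fun hi => h (List.infix_cons_iff.mpr (Or.inr hi))
      simp only [PySem.Chars.splitOnMax.go, hp]
      rw [ih hrest f (c :: cur) acc (by simpa using hf)]
      simp

theorem go_one_found (sep : List Char) (hsep : sep ≠ []) :
    ∀ (l : List Char) (k : Nat), (∀ i < k, ¬ sep <+: l.drop i) → sep <+: l.drop k →
      ∀ (fuel : Nat) (cur : List Char) (acc : List (List Char)), l.length ≤ fuel →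
        PySem.Chars.splitOnMax.go sep fuel 1 l cur acc =
          acc.reverse ++ [cur.reverse ++ l.take k, l.drop (k + sep.length)] := by
  intro l
  induction l with
  | nil =>
    intro k _ hk fuel cur acc _
    rw [List.drop_nil] at hk
    exact absurd (List.prefix_nil.mp hk) hsep
  | cons c rest ih =>
    intro k hmin hk fuel cur acc hf
    cases fuel with
    | zero => simp at hf
    | succ f =>
      cases k with
      | zero =>
        have hp : sep.isPrefixOf (c :: rest) = true :=
          List.isPrefixOf_iff_prefix.mpr (by simpa using hk)
        simp only [PySem.Chars.splitOnMax.go, hp]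
        rw [go_msplit_zero]
        simp
      | succ k' =>
        have hp : sep.isPrefixOf (c :: rest) = false := by
          rw [Bool.eq_false_iff]
          intro hpre
          exact hmin 0 (Nat.succ_pos _) (by simpa using List.isPrefixOf_iff_prefix.mp hpre)
        simp only [PySem.Chars.splitOnMax.go, hp]
        rw [ih k' (fun i hi => by simpa using hmin (i + 1) (by omega)) (by simpa using hk)
          f (c :: cur) acc (by simpa using hf)]
        have harith : k' + 1 + sep.length = (k' + sep.length) + 1 := by omega
        simp [harith]

-- the message tail: split(": ", 1)[-1] = everything after the first ": " (or the whole string)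
theorem splitLast_eq_findSlice (s : String) :
    ((PySem.Str.splitMax? s ": " 1).getD []).getLastD "" =
      (if PySem.Str.find s ": " < 0 then s
       else PySem.Str.slice s (some (PySem.Str.find s ": " + 2)) none) := by
  have hbr := PySem.Str.splitMax?_map s ": " 1
  have hsep : (": ".toList : List Char) = [':', ' '] := rfl
  have hfind : PySem.Str.find s ": " = PySem.Chars.find s.toList [':', ' '] := by
    rw [PySem.Str.find_eq, hsep]
  rw [hsep] at hbr
  have hchars : PySem.Chars.splitMax? s.toList [':', ' '] 1 =
      some (PySem.Chars.splitOnMax s.toList [':', ' '] 1) := by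
    simp [PySem.Chars.splitMax?]
  rw [hchars] at hbr
  have hmaxdef : PySem.Chars.splitOnMax s.toList [':', ' '] 1 =
      PySem.Chars.splitOnMax.go [':', ' '] (s.toList.length + 1) 1 s.toList [] [] := by
    simp [PySem.Chars.splitOnMax]
  by_cases h : PySem.Str.find s ": " < 0
  · -- no occurrence
    have h1 : PySem.Chars.find s.toList [':', ' '] = -1 := by
      have := PySem.Chars.neg_one_le_find s.toList [':', ' ']
      omega
    have hni : ¬ ([':', ' '] : List Char) <:+: s.toList :=
      (PySem.Chars.find_eq_neg_one_iff _ _).mp h1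
    have hres : PySem.Chars.splitOnMax s.toList [':', ' '] 1 = [s.toList] := by
      rw [hmaxdef, go_one_notfound _ _ hni _ _ _ (by omega)]
      simp
    rw [hres] at hbr
    cases hx : PySem.Str.splitMax? s ": " 1 with
    | none => rw [hx] at hbr; simp at hbr
    | some xs =>
      rw [hx] at hbr
      simp only [Option.map_some, Option.some_inj] at hbr
      cases xs with
      | nil => simp at hbr
      | cons a t =>
        cases t with
        | nil =>
          simp only [List.map_cons, List.map_nil] at hbr
          have ha : a = s := String.toList_injective (by simpa using hbr)
          rw [if_pos h]
          simp [ha]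
        | cons b t' => simp at hbr
  · -- first occurrence at k
    rw [not_lt] at h
    have h0 : 0 ≤ PySem.Chars.find s.toList [':', ' '] := hfind ▸ h
    obtain ⟨hpre, hmin⟩ := PySem.Chars.find_spec h0
    set k := (PySem.Chars.find s.toList [':', ' ']).toNat with hkdef
    have hres : PySem.Chars.splitOnMax s.toList [':', ' '] 1 =
        [s.toList.take k, s.toList.drop (k + 2)] := by
      rw [hmaxdef, go_one_found [':', ' '] (by simp) s.toList k hmin hpre _ _ _ (by omega)]
      simp
    rw [hres] at hbr
    cases hx : PySem.Str.splitMax? s ": " 1 with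
    | none => rw [hx] at hbr; simp at hbr
    | some xs =>
      rw [hx] at hbr
      simp only [Option.map_some, Option.some_inj] at hbr
      cases xs with
      | nil => simp at hbr
      | cons a t =>
        cases t with
        | nil => simp at hbr
        | cons b t' =>
          cases t' with
          | cons _ _ => simp at hbr
          | nil =>
            simp only [List.map_cons, List.map_nil, List.cons.injEq, and_true] at hbr
            have hb : b = PySem.Str.slice s (some (PySem.Str.find s ": " + 2)) none := by
              apply String.toList_injective
              rw [PySem.Str.toList_slice, PySem.Chars.slice_eq_listSlice,
                PySem.List.slice_from _ (by omega), hbr.2]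
              congr 1
              rw [hfind]
              omega
            rw [if_neg (not_lt.mpr h), ← hb]
            simp

-- A's guard true forces the tab to exist
theorem find_nonneg_of_guard (line : String) (h : pvGuardA line = true) :
    0 ≤ PySem.Str.find line "\t" := by
  by_contra hneg
  rw [not_le] at hneg
  rw [guard_false_of_find_neg line hneg] at h
  exact Bool.false_ne_true h

-- ===== VERDICT (by name: the statement is the Claim_ definition above) =====
theorem last_commit_from_log_py_spec : Claim_equal_last_commit_from_log_py := by
  intro log_lines _ _
  unfold Spec_last_commit_from_log_py last_commit_from_log_py last_commit_from_log_py_alt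
  rw [revScan_eq_find, foldl_stepB]
  cases hf : log_lines.reverse.find? pvGuardA with
  | none => rfl
  | some l =>
    have hg : pvGuardA l = true := List.find?_some hf
    obtain ⟨hm, hmsg⟩ := parse_eq l (find_nonneg_of_guard l hg)
    simp only [← hm, ← hmsg, splitLast_eq_findSlice]
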